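-- pv_equiv track=rewrite | github.com/pypi-data/pypi-mirror-386 | packages/RobertCommonBasic/RobertCommonBasic-0.1.66-py3-none-any.whl/robertcommonbasic/basic/data/utils.py | revert_exp
-- ===== SOURCE A (Python) =====
-- def find_all_pos(scale: str, exp: str):
--     return [i for i, c in enumerate(scale) if c == exp]
--
-- def revert_exp(scale: str) -> str:
--     exps = {'+': ['-', []], '-': ['+', []], '*': ['/', []], '/': ['*', []]}
--     for exp in exps.keys():
--         exps[exp][1] = find_all_pos(scale, exp)
--
--     _scale = list(scale)
--     for exp, [_exp, pos] in exps.items():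
--         for _pos in pos:
--             _scale[_pos:_pos+1] = _exp
--     return ''.join(_scale)
-- ===== SOURCE B (Python) =====
-- _TRANS = str.maketrans({'+': '-', '-': '+', '*': '/', '/': '*'})
--
-- def revert_exp(scale: str) -> str:
--     return scale.translate(_TRANS)
-- ===== Notes on version B (the rewrite author's own statement) =====
-- stated objective: simpler
-- what changed: Replaced four separate position-collecting scans plus a list-splice rebuild with a single pass translating each character through a fixed operator map (str.translate).
import Mathlib
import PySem

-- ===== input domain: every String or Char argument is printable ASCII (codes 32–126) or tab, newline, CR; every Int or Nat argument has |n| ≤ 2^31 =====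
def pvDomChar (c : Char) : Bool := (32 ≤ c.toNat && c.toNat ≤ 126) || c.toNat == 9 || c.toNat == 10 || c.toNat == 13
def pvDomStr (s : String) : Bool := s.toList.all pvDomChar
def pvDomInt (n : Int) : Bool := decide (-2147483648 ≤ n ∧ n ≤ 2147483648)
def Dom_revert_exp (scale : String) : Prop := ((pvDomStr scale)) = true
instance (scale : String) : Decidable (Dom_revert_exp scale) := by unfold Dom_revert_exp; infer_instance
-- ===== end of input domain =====

-- B replaces A's four position-collecting scans + list-splice rebuild with one pass mapping each char through a fixed operator map (simpler).


-- ===== PORT A =====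
-- find_all_pos: comprehension over enumerate(scale); indices are Int per PySem.List.enumerate
def findAllPos (scale : List Char) (e : Char) : List Int :=
  (PySem.List.enumerate scale).filterMap (fun p => if p.2 = e then some p.1 else none)

-- _scale[p:p+1] = _exp with a one-char _exp and 0 ≤ p < len(_scale) is exactly the
-- element assignment _scale[p] = _exp; ported as List.set (enumerate positions are ≥ 0 and in range)
def spliceSet (cs : List Char) (p : Int) (e : Char) : List Char := cs.set p.toNat e

def revert_exp (scale : String) : String :=
  let exps : List (Char × Char × List Int) :=
    [('+', '-', findAllPos scale.toList '+'),
     ('-', '+', findAllPos scale.toList '-'),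
     ('*', '/', findAllPos scale.toList '*'),
     ('/', '*', findAllPos scale.toList '/')]
  let out := exps.foldl (fun acc it => it.2.2.foldl (fun a p => spliceSet a p it.2.1) acc) scale.toList
  String.mk out

-- ===== PORT B =====
-- the fixed translation map {'+':'-','-':'+','*':'/','/':'*'}, default: the char itself
def transChar (c : Char) : Char :=
  if c = '+' then '-' else if c = '-' then '+' else if c = '*' then '/'
  else if c = '/' then '*' else c

def revert_exp_alt (scale : String) : String :=
  String.mk (scale.toList.map transChar)

-- ===== PRECONDITION & SPEC =====
def Spec_revert_exp (scale : String) (out : String) : Prop := out = revert_exp_alt scale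
instance (scale : String) (out : String) : Decidable (Spec_revert_exp scale out) := by unfold Spec_revert_exp; infer_instance

-- ===== CLAIM (what is proved, stated in full; the proofs are below) =====
def Claim_equal_revert_exp : Prop := ∀ (scale : String), Dom_revert_exp scale → Spec_revert_exp scale (revert_exp scale)

-- ===== LEMMAS AND PROOFS =====

theorem mem_findAllPos (cs : List Char) (e : Char) (p : Int) :
    p ∈ findAllPos cs e ↔ ∃ k : Nat, p = (k : Int) ∧ cs[k]? = some e := by
  simp only [findAllPos, List.mem_filterMap, PySem.List.mem_enumerate_iff]
  constructor
  · rintro ⟨⟨i, c⟩, ⟨k, hk, hik⟩, h⟩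
    obtain ⟨h1, h2⟩ := Prod.mk.injEq .. ▸ hik
    by_cases hc : c = e
    · simp [hc] at h
      refine ⟨k, by omega, ?_⟩
      rw [List.getElem?_eq_getElem hk, ← h2, hc]
    · simp [hc] at h
  · rintro ⟨k, hp, hk⟩
    have hlt : k < cs.length := (List.getElem?_eq_some_iff.mp hk).1
    refine ⟨((k : Int), cs[k]), ⟨k, hlt, by simp⟩, ?_⟩
    have : cs[k] = e := by
      have := List.getElem?_eq_getElem hlt ▸ hk; exact Option.some.injEq .. ▸ this
    simp [this, hp]

theorem length_foldl_spliceSet (P : List Int) (e2 : Char) (acc : List Char) :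
    (P.foldl (fun a p => spliceSet a p e2) acc).length = acc.length := by
  induction P generalizing acc with
  | nil => rfl
  | cons p P ih => rw [List.foldl_cons, ih]; simp [spliceSet]

theorem getElem?_foldl_spliceSet (P : List Int) (e2 : Char) (acc : List Char) (j : Nat)
    (hP : ∀ p ∈ P, ∃ k : Nat, p = (k : Int) ∧ k < acc.length) :
    (P.foldl (fun a p => spliceSet a p e2) acc)[j]? =
      if (j : Int) ∈ P then some e2 else acc[j]? := by
  induction P generalizing acc with
  | nil => simp
  | cons p P ih =>
    obtain ⟨k, hpk, hklt⟩ := hP p (List.mem_cons_self ..)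
    rw [List.foldl_cons, ih _ (fun q hq => by
      obtain ⟨k', h1, h2⟩ := hP q (List.mem_cons_of_mem _ hq)
      exact ⟨k', h1, by simpa [spliceSet] using h2⟩)]
    subst hpk
    simp only [spliceSet, Int.toNat_natCast, List.getElem?_set, List.mem_cons]
    by_cases hjP : (j : Int) ∈ P
    · simp [hjP]
    · by_cases hjk : (j : Int) = (k : Int)
      · have : k = j := by omega
        subst this
        simp [hjP, hklt]
      · have : ¬ k = j := by omega
        simp [hjP, hjk, this]

theorem revert_exp_spec : Claim_equal_revert_exp := by
  intro scale _
  unfold Spec_revert_exp revert_exp revert_exp_alt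
  simp only []
  set cs := scale.toList with hcs
  congr 1
  have hmemlt : ∀ (e : Char) p, p ∈ findAllPos cs e → ∃ k : Nat, p = (k : Int) ∧ k < cs.length := by
    intro e p hp
    obtain ⟨k, h1, h2⟩ := (mem_findAllPos cs e p).mp hp
    exact ⟨k, h1, (List.getElem?_eq_some_iff.mp h2).1⟩
  apply List.ext_getElem?
  intro j
  rw [List.foldl_cons, List.foldl_cons, List.foldl_cons, List.foldl_cons, List.foldl_nil]
  rw [getElem?_foldl_spliceSet _ _ _ _ (fun p hp => by
        obtain ⟨k, h1, h2⟩ := hmemlt _ p hp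
        exact ⟨k, h1, by simp [length_foldl_spliceSet, h2]⟩)]
  rw [getElem?_foldl_spliceSet _ _ _ _ (fun p hp => by
        obtain ⟨k, h1, h2⟩ := hmemlt _ p hp
        exact ⟨k, h1, by simp [length_foldl_spliceSet, h2]⟩)]
  rw [getElem?_foldl_spliceSet _ _ _ _ (fun p hp => by
        obtain ⟨k, h1, h2⟩ := hmemlt _ p hp
        exact ⟨k, h1, by simp [length_foldl_spliceSet, h2]⟩)]
  rw [getElem?_foldl_spliceSet _ _ _ _ (fun p hp => by
        obtain ⟨k, h1, h2⟩ := hmemlt _ p hp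
        exact ⟨k, h1, h2⟩)]
  have hm : ∀ e : Char, ((j : Int) ∈ findAllPos cs e) ↔ cs[j]? = some e := by
    intro e
    rw [mem_findAllPos]
    constructor
    · rintro ⟨k, h1, h2⟩; have : k = j := by omega
      subst this; exact h2
    · intro h; exact ⟨j, rfl, h⟩
  simp only [hm, List.getElem?_map]
  cases h : cs[j]? with
  | none => simp
  | some c =>
    simp only [Option.map_some, Option.some.injEq]
    unfold transChar
    split_ifs with h1 h2 h3 h4 <;> simp_all
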